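-- pv_equiv track=rewrite | github.com/GeorgeMargineanu/Adreal-Fetcher | CandyHaier/common/gather_all.py | get_brand_owner
-- ===== SOURCE A (Python) =====
-- def get_brand_owner(brand_id, brands_lookup):
--     """
--     Given a brand ID, find the top-level Brand owner by recursively
--     traversing the parent hierarchy.
--     """
--     current_id = brand_id
--     owner_name = None
--
--     # Traverse up the brand hierarchy until the top is reached (no parent_id)
--     while current_id:
--         brand_info = brands_lookup.get(current_id)
--         if not brand_info:
--             # If the ID is invalid, stop and return the last valid name found (or None)
--             return owner_name
--
--         # Store the current name as the potential owner. This name will be the top-most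
--         # when the loop terminates.
--         owner_name = brand_info.get("name")
--
--         parent_id = brand_info.get("parent_id")
--
--         if not parent_id:
--             # We hit the top level (no parent_id defined), so owner_name is the true owner.
--             return owner_name
--
--         # Move up to the parent level for the next iteration
--         current_id = parent_id
--
--     return owner_name
-- ===== SOURCE B (Python) =====
-- def get_brand_owner(brand_id, brands_lookup):
--     """Recursive form: walk to the top of the parent chain and return that
--     node's name; None when brand_id is falsy or does not resolve."""
--     if not brand_id:
--         return None
--     info = brands_lookup.get(brand_id)
--     if not info:
--         return None
--     parent_id = info.get("parent_id")
--     if parent_id and brands_lookup.get(parent_id):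
--         return get_brand_owner(parent_id, brands_lookup)
--     return info.get("name")
-- ===== Notes on version B (the rewrite author's own statement) =====
-- stated objective: simpler
-- what changed: A's while-loop that drags an owner_name accumulator up the chain is replaced by a direct recursion that probes whether the parent resolves before descending, so no running state is needed; Pre_ excludes only cyclic parent chains, on which A loops forever.
import Mathlib
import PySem

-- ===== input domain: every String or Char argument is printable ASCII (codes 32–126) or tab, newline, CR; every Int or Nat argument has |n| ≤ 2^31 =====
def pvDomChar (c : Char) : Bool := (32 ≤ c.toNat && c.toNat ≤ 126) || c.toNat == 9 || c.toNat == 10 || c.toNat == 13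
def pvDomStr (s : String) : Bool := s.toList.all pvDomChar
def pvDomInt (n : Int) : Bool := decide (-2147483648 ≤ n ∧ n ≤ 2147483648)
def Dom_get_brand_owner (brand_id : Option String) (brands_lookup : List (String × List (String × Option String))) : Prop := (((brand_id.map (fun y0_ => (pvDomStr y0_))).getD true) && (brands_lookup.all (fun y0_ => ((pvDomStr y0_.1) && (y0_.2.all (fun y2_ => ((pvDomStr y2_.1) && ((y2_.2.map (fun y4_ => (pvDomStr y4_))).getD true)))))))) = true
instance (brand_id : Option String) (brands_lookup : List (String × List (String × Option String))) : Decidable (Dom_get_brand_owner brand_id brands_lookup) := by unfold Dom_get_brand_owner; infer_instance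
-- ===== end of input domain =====

-- B replaces A's while-loop with an accumulator by a direct recursion on the parent
-- chain that looks the parent up before descending (objective: simpler decomposition,
-- no running owner_name state).

-- ===== PORT A =====
-- A's while-loop, fueled (fuel = |brands_lookup| + 1 suffices on every acyclic chain,
-- i.e. whenever the Python loop terminates; Pre_ below excludes cyclic inputs, on
-- which the Python A never returns).  dict.get → List.lookup (first match);
-- `.join` flattens dict.get of an Option-valued entry exactly as Python's .get.
def goA (L : List (String × List (String × Option String))) :
    Nat → Option String → Option String → Option String
  | 0, _, owner => owner
  | fuel+1, cur, owner =>
    match cur with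
    | none => owner                                   -- while current_id: falsy (None)
    | some c =>
      if c = "" then owner                            -- while current_id: falsy ("")
      else
        match List.lookup c L with
        | none => owner                               -- if not brand_info (missing)
        | some info =>
          if info = [] then owner                     -- if not brand_info (empty dict)
          else
            let owner' := (List.lookup "name" info).join
            match (List.lookup "parent_id" info).join with
            | none => owner'                          -- if not parent_id (None)
            | some p =>
              if p = "" then owner'                   -- if not parent_id ("")
              else goA L fuel (some p) owner'         -- current_id = parent_id

def get_brand_owner (brand_id : Option String) (brands_lookup : List (String × List (String × Option String))) : Option String :=
  goA brands_lookup (brands_lookup.length + 1) brand_id none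

-- ===== PORT B =====
-- B's recursion (same fuel bound): descend to the parent only when it is truthy and
-- resolves to a truthy dict; otherwise return this node's name.
def goB (L : List (String × List (String × Option String))) : Nat → String → Option String
  | 0, _ => none
  | fuel+1, b =>
    match List.lookup b L with
    | none => none                                    -- if not info: return None
    | some info =>
      if info = [] then none                          -- if not info: return None
      else
        match (List.lookup "parent_id" info).join with
        | none => (List.lookup "name" info).join
        | some p =>
          if p = "" then (List.lookup "name" info).join
          else
            match List.lookup p L with
            | none => (List.lookup "name" info).join
            | some info2 =>
              if info2 = [] then (List.lookup "name" info).join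
              else goB L fuel p                       -- recurse on the parent

def get_brand_owner_alt (brand_id : Option String) (brands_lookup : List (String × List (String × Option String))) : Option String :=
  match brand_id with
  | none => none                                      -- if not brand_id: return None
  | some b => if b = "" then none else goB brands_lookup (brands_lookup.length + 1) b

-- ===== PRECONDITION & SPEC =====
-- One step up the parent chain of the input: defined (some p) exactly when the node
-- resolves to a non-empty dict with a truthy parent_id.
def pvParentStep (L : List (String × List (String × Option String))) (c : String) : Option String :=
  match List.lookup c L with
  | none => none
  | some info =>
    if info = [] then none
    else
      match (List.lookup "parent_id" info).join with
      | none => none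
      | some p => if p = "" then none else some p

def pvStart (brand_id : Option String) : Option String :=
  match brand_id with
  | none => none
  | some s => if s = "" then none else some s

-- Pre_ excludes exactly the inputs whose parent chain from brand_id is cyclic: there
-- the Python A loops forever (it never returns).  On acyclic inputs the chain visits
-- each key at most once, so it reaches a top within |brands_lookup| + 1 steps.
def Pre_get_brand_owner (brand_id : Option String) (brands_lookup : List (String × List (String × Option String))) : Prop :=
  (fun o => Option.bind o (pvParentStep brands_lookup))^[brands_lookup.length + 1] (pvStart brand_id) = none

instance (brand_id : Option String) (brands_lookup : List (String × List (String × Option String))) : Decidable (Pre_get_brand_owner brand_id brands_lookup) := by unfold Pre_get_brand_owner; infer_instance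

def pvWitness_get_brand_owner : Option String × (List (String × List (String × Option String))) :=
  (some "a", [("a", [("name", some "Brand A"), ("parent_id", some "b")]),
              ("b", [("name", some "Owner B"), ("parent_id", none)])])

def Spec_get_brand_owner (brand_id : Option String) (brands_lookup : List (String × List (String × Option String))) (out : Option String) : Prop := out = get_brand_owner_alt brand_id brands_lookup
instance (brand_id : Option String) (brands_lookup : List (String × List (String × Option String))) (out : Option String) : Decidable (Spec_get_brand_owner brand_id brands_lookup out) := by unfold Spec_get_brand_owner; infer_instance

-- ===== CLAIM (what is proved, stated in full; the proofs are below) =====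
def Claim_equal_get_brand_owner : Prop := ∀ (brand_id : Option String) (brands_lookup : List (String × List (String × Option String))), Dom_get_brand_owner brand_id brands_lookup → Pre_get_brand_owner brand_id brands_lookup → Spec_get_brand_owner brand_id brands_lookup (get_brand_owner brand_id brands_lookup)

-- ===== LEMMAS AND PROOFS =====

-- Core invariant: on a live node (c truthy, resolving to a non-empty dict) whose
-- chain dies within `fuel` steps, A's loop ignores its accumulator and agrees with B.
theorem goA_eq_goB (L : List (String × List (String × Option String))) :
    ∀ (fuel : Nat) (c : String) (owner : Option String),
      (fun o => Option.bind o (pvParentStep L))^[fuel] (some c) = none →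
      c ≠ "" →
      ∀ info, List.lookup c L = some info → info ≠ [] →
      goA L fuel (some c) owner = goB L fuel c := by
  intro fuel
  induction fuel with
  | zero => intro c owner hiter; simp at hiter
  | succ f ih =>
    intro c owner hiter hc info hlk hinfo
    rw [Function.iterate_succ_apply] at hiter
    simp only [Option.bind_some] at hiter
    simp only [goA, goB, if_neg hc, hlk, if_neg hinfo]
    have hstep : pvParentStep L c =
        match (List.lookup "parent_id" info).join with
        | none => none
        | some p => if p = "" then none else some p := by
      simp [pvParentStep, hlk, hinfo]
    rw [hstep] at hiter
    cases hpar : (List.lookup "parent_id" info).join with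
    | none => simp
    | some p =>
      rw [hpar] at hiter
      simp only at hiter ⊢
      by_cases hp : p = ""
      · simp [hp]
      · rw [if_neg hp] at hiter
        simp only [if_neg hp]
        -- the chain continues to p, and dies within f steps
        have hf : f ≠ 0 := by
          intro h; subst h; simp at hiter
        obtain ⟨f', rfl⟩ := Nat.exists_eq_succ_of_ne_zero hf
        cases hlk2 : List.lookup p L with
        | none =>
          simp only [goA, if_neg hp, hlk2]
        | some info2 =>
          by_cases hi2 : info2 = []
          · subst hi2
            simp only [goA, if_neg hp, hlk2]
            simp
          · simp only [if_neg hi2]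
            exact ih p _ hiter hp info2 hlk2 hi2

theorem get_brand_owner_spec : Claim_equal_get_brand_owner := by
  intro bid L _dom hpre
  unfold Spec_get_brand_owner get_brand_owner get_brand_owner_alt
  unfold Pre_get_brand_owner at hpre
  cases bid with
  | none => simp [goA]
  | some b =>
    by_cases hb : b = ""
    · simp [goA, hb]
    · simp only [if_neg hb]
      have hstart : pvStart (some b) = some b := by simp [pvStart, hb]
      rw [hstart] at hpre
      cases hlk : List.lookup b L with
      | none => simp [goA, goB, hlk]
      | some info =>
        by_cases hi : info = []
        · subst hi
          simp [goA, goB, hlk]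
        · exact goA_eq_goB L _ b none hpre hb info hlk hi
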